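-- pv_equiv track=rewrite | github.com/ruirui1028/fhgdutd | assignment2_Q2.py | fib_count_overlap_once
-- ===== SOURCE A (Python) =====
-- def fib_count_overlap_once(n):
--     count = 0
--     f = [0] * (n + 1)
--     f[0], f[1] = 1, 1
--     f4_calls = [0] * (n + 1)  # List to store the number of times F(4) is called
--     for i in range(2, n + 1):
--         f[i] = f[i - 1] + f[i - 2]
--         count += 1  # Count the number of times F(4) is computed
--         if i >= 4:
--             f4_calls[i] = f4_calls[i - 1] + f4_calls[i - 2] + 1
--     return f4_calls
-- ===== SOURCE B (Python) =====
-- def fib_count_overlap_once(n):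
--     # Compute the Fibonacci sequence once, then fill the answer by the
--     # closed transform f4_calls[i] = fib[i-2] - 1 (number of F(4) calls
--     # inside a naive recursive F(i)).
--     result = [0] * (n + 1)
--     fib = [1] * (n + 1)
--     for i in range(2, n + 1):
--         fib[i] = fib[i - 1] + fib[i - 2]
--     for i in range(4, n + 1):
--         result[i] = fib[i - 2] - 1
--     return result
-- ===== Notes on version B (the rewrite author's own statement) =====
-- stated objective: alternative
-- what changed: B replaces A's self-referential f4_calls[i]=f4_calls[i-1]+f4_calls[i-2]+1 accumulation (run inside the same loop as the unused Fibonacci array) with two separate passes: compute the Fibonacci array once, then fill the answer by the closed transform f4_calls[i] = fib[i-2] - 1.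
import Mathlib
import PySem

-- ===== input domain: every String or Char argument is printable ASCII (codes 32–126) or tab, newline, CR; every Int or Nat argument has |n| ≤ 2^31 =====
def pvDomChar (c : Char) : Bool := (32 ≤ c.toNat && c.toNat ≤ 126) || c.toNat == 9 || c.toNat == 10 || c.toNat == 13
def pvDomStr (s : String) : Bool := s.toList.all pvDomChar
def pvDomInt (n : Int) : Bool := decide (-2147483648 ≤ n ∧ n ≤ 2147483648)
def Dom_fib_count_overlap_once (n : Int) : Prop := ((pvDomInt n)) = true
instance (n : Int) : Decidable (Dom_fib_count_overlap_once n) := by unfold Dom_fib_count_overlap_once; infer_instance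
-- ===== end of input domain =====

-- B computes the Fibonacci array once and fills the answer with the closed transform
-- f4_calls[i] = fib[i-2] - 1, replacing A's self-referential accumulation (alternative decomposition).
-- Pre_ excludes nonpositive n, where the Python A raises IndexError.


-- ===== PORT A =====
def fib_count_overlap_once (n : Int) : List Int :=
  let count : Int := 0
  let f : List Int := List.replicate (n + 1).toNat 0
  let f : List Int := PySem.List.pySetD (PySem.List.pySetD f 0 1) 1 1
  let f4_calls : List Int := List.replicate (n + 1).toNat 0
  let st := (PySem.List.pyRange 2 (n + 1) 1).foldl
    (fun st i =>
      let f := PySem.List.pySetD st.2.1 i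
        (PySem.List.pyGetD st.2.1 (i - 1) 0 + PySem.List.pyGetD st.2.1 (i - 2) 0)
      let count := st.1 + 1
      let f4_calls :=
        if i ≥ 4 then
          PySem.List.pySetD st.2.2 i
            (PySem.List.pyGetD st.2.2 (i - 1) 0 + PySem.List.pyGetD st.2.2 (i - 2) 0 + 1)
        else st.2.2
      (count, f, f4_calls))
    (count, f, f4_calls)
  st.2.2

-- ===== PORT B =====
def fib_count_overlap_once_alt (n : Int) : List Int :=
  let result : List Int := List.replicate (n + 1).toNat 0
  let fib : List Int := List.replicate (n + 1).toNat 1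
  let fib := (PySem.List.pyRange 2 (n + 1) 1).foldl
    (fun fib i =>
      PySem.List.pySetD fib i
        (PySem.List.pyGetD fib (i - 1) 0 + PySem.List.pyGetD fib (i - 2) 0)) fib
  (PySem.List.pyRange 4 (n + 1) 1).foldl
    (fun result i =>
      PySem.List.pySetD result i (PySem.List.pyGetD fib (i - 2) 0 - 1)) result

-- ===== PRECONDITION & SPEC =====
-- Pre_ excludes nonpositive n, on which Python A raises IndexError at the assignment f[0], f[1] = 1, 1.
def Pre_fib_count_overlap_once (n : Int) : Prop := 1 ≤ n
instance (n : Int) : Decidable (Pre_fib_count_overlap_once n) := by unfold Pre_fib_count_overlap_once; infer_instance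
def pvWitness_fib_count_overlap_once : Int := 6

def Spec_fib_count_overlap_once (n : Int) (out : List Int) : Prop := out = fib_count_overlap_once_alt n
instance (n : Int) (out : List Int) : Decidable (Spec_fib_count_overlap_once n out) := by unfold Spec_fib_count_overlap_once; infer_instance

-- ===== CLAIM (what is proved, stated in full; the proofs are below) =====
def Claim_equal_fib_count_overlap_once : Prop := ∀ (n : Int), Dom_fib_count_overlap_once n → Pre_fib_count_overlap_once n → Spec_fib_count_overlap_once n (fib_count_overlap_once n)

-- ===== LEMMAS AND PROOFS =====

-- fibN k = Python's F(k) with F(0) = F(1) = 1.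
def fibN : Nat → Int
  | 0 => 1
  | 1 => 1
  | (k + 2) => fibN (k + 1) + fibN k

theorem getD_set' (L : List Int) (v : Int) (i k : Nat) :
    (L.set i v).getD k 0 = if i = k ∧ i < L.length then v else L.getD k 0 := by
  simp [List.getD_eq_getElem?_getD, List.getElem?_set]
  split_ifs <;> simp_all <;> omega

theorem getD_repl (N k : Nat) (x : Int) : (List.replicate N x).getD k 0 = if k < N then x else 0 := by
  simp [List.getD_eq_getElem?_getD, List.getElem?_replicate]
  split_ifs <;> simp_all

theorem list_eq_of_getD (xs ys : List Int) (h : xs.length = ys.length)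
    (hg : ∀ k, k < xs.length → xs.getD k 0 = ys.getD k 0) : xs = ys := by
  apply List.ext_getElem h
  intro k h1 h2
  have := hg k h1
  rwa [List.getD_eq_getElem _ _ h1, List.getD_eq_getElem _ _ h2] at this

-- A's returned component depends only on the f4_calls component of the fold state.
theorem foldl_proj22 (l : List Int) (c : Int) (f g : List Int) :
    ((l.foldl
      (fun (st : Int × List Int × List Int) i =>
        let f := PySem.List.pySetD st.2.1 i
          (PySem.List.pyGetD st.2.1 (i - 1) 0 + PySem.List.pyGetD st.2.1 (i - 2) 0)
        let count := st.1 + 1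
        let f4_calls :=
          if i ≥ 4 then
            PySem.List.pySetD st.2.2 i
              (PySem.List.pyGetD st.2.2 (i - 1) 0 + PySem.List.pyGetD st.2.2 (i - 2) 0 + 1)
          else st.2.2
        (count, f, f4_calls)) (c, f, g)).2.2) =
    l.foldl
      (fun g i =>
        if i ≥ 4 then
          PySem.List.pySetD g i
            (PySem.List.pyGetD g (i - 1) 0 + PySem.List.pyGetD g (i - 2) 0 + 1)
        else g) g := by
  induction l generalizing c f g with
  | nil => rfl
  | cons x xs ih => simp only [List.foldl_cons]; exact ih _ _ _

theorem fibLoop_inv (N : Nat) (f0 : List Int) (h0 : f0.length = N)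
    (hg0 : f0.getD 0 0 = 1) (hg1 : f0.getD 1 0 = 1)
    (m : Nat) (hm : m + 2 ≤ N) :
    ((PySem.List.pyRange 2 (2 + (m : Int)) 1).foldl
      (fun fib i =>
        PySem.List.pySetD fib i
          (PySem.List.pyGetD fib (i - 1) 0 + PySem.List.pyGetD fib (i - 2) 0)) f0).length = N ∧
    ∀ k : Nat, k < N →
      ((PySem.List.pyRange 2 (2 + (m : Int)) 1).foldl
        (fun fib i =>
          PySem.List.pySetD fib i
            (PySem.List.pyGetD fib (i - 1) 0 + PySem.List.pyGetD fib (i - 2) 0)) f0).getD k 0 =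
      (if k < m + 2 then fibN k else f0.getD k 0) := by
  induction m with
  | zero =>
    rw [show (2 + ((0:Nat) : Int)) = 2 by norm_num, PySem.List.pyRange_one_eq_nil (by omega)]
    refine ⟨h0, fun k hk => ?_⟩
    simp only [List.foldl_nil]
    split_ifs with h
    · interval_cases k
      · simpa using hg0
      · simpa using hg1
    · rfl
  | succ m ih =>
    obtain ⟨hlen, hget⟩ := ih (by omega)
    have h1 : (2 + ((m+1:Nat) : Int)) = (2 + (m : Int)) + 1 := by push_cast; ring
    rw [h1, PySem.List.pyRange_one_succ_right (by omega), List.foldl_append]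
    set L := ((PySem.List.pyRange 2 (2 + (m : Int)) 1).foldl
      (fun fib i =>
        PySem.List.pySetD fib i
          (PySem.List.pyGetD fib (i - 1) 0 + PySem.List.pyGetD fib (i - 2) 0)) f0) with hL
    simp only [List.foldl_cons, List.foldl_nil]
    have e1 : (2 + (m : Int)) - 1 = ((m+1 : Nat) : Int) := by push_cast; ring
    have e2 : (2 + (m : Int)) - 2 = ((m : Nat) : Int) := by omega
    have e0 : (2 + (m : Int)) = ((m+2 : Nat) : Int) := by push_cast; ring
    rw [e1, e2, e0, PySem.List.pyGetD_natCast, PySem.List.pyGetD_natCast, PySem.List.pySetD_natCast]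
    have hv1 : L.getD (m+1) 0 = fibN (m+1) := by rw [hget (m+1) (by omega)]; simp
    have hv2 : L.getD m 0 = fibN m := by rw [hget m (by omega)]; simp
    rw [hv1, hv2]
    refine ⟨by simp [hlen], fun k hk => ?_⟩
    rw [getD_set']
    rcases eq_or_ne (m+2) k with rfl | hne
    · simp [hlen, show m+2 < m+1+2 by omega, fibN]
      exact fun h => absurd hk (by omega)
    · rw [if_neg (by simp [hne]), hget k hk]
      by_cases h : k < m + 2
      · rw [if_pos h, if_pos (by omega)]
      · rw [if_neg h, if_neg (by omega)]

theorem f4Loop_inv (N : Nat) (m : Nat) (hm : m + 2 ≤ N) :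
    ((PySem.List.pyRange 2 (2 + (m : Int)) 1).foldl
      (fun g i =>
        if i ≥ 4 then
          PySem.List.pySetD g i
            (PySem.List.pyGetD g (i - 1) 0 + PySem.List.pyGetD g (i - 2) 0 + 1)
        else g) (List.replicate N (0 : Int))).length = N ∧
    ∀ k : Nat, k < N →
      ((PySem.List.pyRange 2 (2 + (m : Int)) 1).foldl
        (fun g i =>
          if i ≥ 4 then
            PySem.List.pySetD g i
              (PySem.List.pyGetD g (i - 1) 0 + PySem.List.pyGetD g (i - 2) 0 + 1)
          else g) (List.replicate N (0 : Int))).getD k 0 =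
      (if 4 ≤ k ∧ k < m + 2 then fibN (k - 2) - 1 else 0) := by
  induction m with
  | zero =>
    rw [show (2 + ((0:Nat) : Int)) = 2 by norm_num, PySem.List.pyRange_one_eq_nil (by omega)]
    refine ⟨by simp, fun k hk => ?_⟩
    simp only [List.foldl_nil]
    rw [getD_repl, if_pos hk, if_neg (by omega)]
  | succ m ih =>
    obtain ⟨hlen, hget⟩ := ih (by omega)
    have h1 : (2 + ((m+1:Nat) : Int)) = (2 + (m : Int)) + 1 := by push_cast; ring
    rw [h1, PySem.List.pyRange_one_succ_right (by omega), List.foldl_append]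
    set L := ((PySem.List.pyRange 2 (2 + (m : Int)) 1).foldl
      (fun g i =>
        if i ≥ 4 then
          PySem.List.pySetD g i
            (PySem.List.pyGetD g (i - 1) 0 + PySem.List.pyGetD g (i - 2) 0 + 1)
        else g) (List.replicate N (0 : Int))) with hL
    simp only [List.foldl_cons, List.foldl_nil]
    by_cases hc : 2 ≤ m
    · rw [if_pos (show (2 + (m : Int)) ≥ 4 by omega)]
      have e1 : (2 + (m : Int)) - 1 = ((m+1 : Nat) : Int) := by push_cast; ring
      have e2 : (2 + (m : Int)) - 2 = ((m : Nat) : Int) := by omega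
      have e0 : (2 + (m : Int)) = ((m+2 : Nat) : Int) := by push_cast; ring
      rw [e1, e2, e0, PySem.List.pyGetD_natCast, PySem.List.pyGetD_natCast, PySem.List.pySetD_natCast]
      refine ⟨by simp [hlen], fun k hk => ?_⟩
      rw [getD_set']
      rcases eq_or_ne (m+2) k with rfl | hne
      · rw [if_pos ⟨rfl, by omega⟩]
        conv_rhs => rw [if_pos (⟨by omega, by omega⟩ : 4 ≤ m + 2 ∧ m + 2 < m + 1 + 2)]
        rw [show m + 2 - 2 = m by omega]
        rcases Nat.lt_or_ge m 4 with h4 | h4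
        · interval_cases m
          · rw [hget (2+1) (by omega), hget 2 (by omega)]; norm_num [fibN]
          · rw [hget (3+1) (by omega), hget 3 (by omega)]; norm_num [fibN]
        · obtain ⟨t, rfl⟩ : ∃ t, m = t + 4 := ⟨m - 4, by omega⟩
          rw [hget (t+4+1) (by omega), hget (t+4) (by omega),
            if_pos (⟨by omega, by omega⟩ : 4 ≤ t+4+1 ∧ t+4+1 < t+4+2),
            if_pos (⟨by omega, by omega⟩ : 4 ≤ t+4 ∧ t+4 < t+4+2),
            show t + 4 + 1 - 2 = t + 3 by omega, show t + 4 - 2 = t + 2 by omega,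
            show fibN (t + 4) = fibN (t + 3) + fibN (t + 2) from rfl]
          ring
      · rw [if_neg (show ¬(m + 2 = k ∧ m + 2 < L.length) from by simp [hne]), hget k hk]
        by_cases h : 4 ≤ k ∧ k < m + 2
        · rw [if_pos h, if_pos ⟨h.1, by omega⟩]
        · rw [if_neg h, if_neg (by rintro ⟨ha, hb⟩; exact h ⟨ha, by omega⟩)]
    · rw [if_neg (show ¬((2 + (m : Int)) ≥ 4) by omega)]
      refine ⟨hlen, fun k hk => ?_⟩
      rw [hget k hk, if_neg (by omega), if_neg (by omega)]

theorem rLoop_inv (N : Nat) (fib : List Int) (hfib : ∀ k : Nat, k < N → fib.getD k 0 = fibN k)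
    (m : Nat) (hm : m + 4 ≤ N) :
    ((PySem.List.pyRange 4 (4 + (m : Int)) 1).foldl
      (fun result i =>
        PySem.List.pySetD result i (PySem.List.pyGetD fib (i - 2) 0 - 1))
      (List.replicate N (0 : Int))).length = N ∧
    ∀ k : Nat, k < N →
      ((PySem.List.pyRange 4 (4 + (m : Int)) 1).foldl
        (fun result i =>
          PySem.List.pySetD result i (PySem.List.pyGetD fib (i - 2) 0 - 1))
        (List.replicate N (0 : Int))).getD k 0 =
      (if 4 ≤ k ∧ k < m + 4 then fibN (k - 2) - 1 else 0) := by
  induction m with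
  | zero =>
    rw [show (4 + ((0:Nat) : Int)) = 4 by norm_num, PySem.List.pyRange_one_eq_nil (by omega)]
    refine ⟨by simp, fun k hk => ?_⟩
    simp only [List.foldl_nil]
    rw [getD_repl, if_pos hk, if_neg (by omega)]
  | succ m ih =>
    obtain ⟨hlen, hget⟩ := ih (by omega)
    have h1 : (4 + ((m+1:Nat) : Int)) = (4 + (m : Int)) + 1 := by push_cast; ring
    rw [h1, PySem.List.pyRange_one_succ_right (by omega), List.foldl_append]
    set L := ((PySem.List.pyRange 4 (4 + (m : Int)) 1).foldl
      (fun result i =>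
        PySem.List.pySetD result i (PySem.List.pyGetD fib (i - 2) 0 - 1))
      (List.replicate N (0 : Int))) with hL
    simp only [List.foldl_cons, List.foldl_nil]
    have e2 : (4 + (m : Int)) - 2 = ((m+2 : Nat) : Int) := by push_cast; ring
    have e0 : (4 + (m : Int)) = ((m+4 : Nat) : Int) := by push_cast; ring
    rw [e2, e0, PySem.List.pyGetD_natCast, PySem.List.pySetD_natCast, hfib (m+2) (by omega)]
    refine ⟨by simp [hlen], fun k hk => ?_⟩
    rw [getD_set']
    rcases eq_or_ne (m+4) k with rfl | hne
    · rw [if_pos ⟨rfl, by omega⟩, if_pos ⟨by omega, by omega⟩, show m + 4 - 2 = m + 2 by omega]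
    · rw [if_neg (by simp [hne]), hget k hk]
      by_cases h : 4 ≤ k ∧ k < m + 4
      · rw [if_pos h, if_pos ⟨h.1, by omega⟩]
      · rw [if_neg h, if_neg (by rintro ⟨ha, hb⟩; exact h ⟨ha, by omega⟩)]


-- ===== VERDICT (by name: the statement is the Claim_ definition above) =====
theorem fib_count_overlap_once_spec : Claim_equal_fib_count_overlap_once := by
  intro n _ hPre
  unfold Pre_fib_count_overlap_once at hPre
  unfold Spec_fib_count_overlap_once
  have hMI : 2 + ((((n+1).toNat - 2 : Nat)) : Int) = n + 1 := by omega
  have hA : fib_count_overlap_once n =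
      (PySem.List.pyRange 2 (n + 1) 1).foldl
        (fun g i =>
          if i ≥ 4 then
            PySem.List.pySetD g i
              (PySem.List.pyGetD g (i - 1) 0 + PySem.List.pyGetD g (i - 2) 0 + 1)
          else g)
        (List.replicate (n+1).toNat (0 : Int)) := by
    unfold fib_count_overlap_once
    exact foldl_proj22 _ _ _ _
  obtain ⟨hlen4, hget4⟩ := f4Loop_inv (n+1).toNat ((n+1).toNat - 2) (by omega)
  rw [hMI] at hlen4 hget4
  obtain ⟨hlenF, hgetF⟩ := fibLoop_inv (n+1).toNat (List.replicate (n+1).toNat 1) (by simp)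
    (by rw [getD_repl, if_pos (by omega)]) (by rw [getD_repl, if_pos (by omega)])
    ((n+1).toNat - 2) (by omega)
  rw [hMI] at hlenF hgetF
  have hfib : ∀ k, k < (n+1).toNat →
      ((PySem.List.pyRange 2 (n + 1) 1).foldl
        (fun fib i =>
          PySem.List.pySetD fib i
            (PySem.List.pyGetD fib (i - 1) 0 + PySem.List.pyGetD fib (i - 2) 0))
        (List.replicate (n+1).toNat (1:Int))).getD k 0 = fibN k :=
    fun k hk => by rw [hgetF k hk, if_pos (by omega)]
  have hB : fib_count_overlap_once_alt n =
      (PySem.List.pyRange 4 (n + 1) 1).foldl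
        (fun result i =>
          PySem.List.pySetD result i (PySem.List.pyGetD
            ((PySem.List.pyRange 2 (n + 1) 1).foldl
              (fun fib i =>
                PySem.List.pySetD fib i
                  (PySem.List.pyGetD fib (i - 1) 0 + PySem.List.pyGetD fib (i - 2) 0))
              (List.replicate (n+1).toNat (1:Int))) (i - 2) 0 - 1))
        (List.replicate (n+1).toNat (0:Int)) := rfl
  rw [hA, hB]
  rcases lt_or_ge n 4 with h4 | h4
  · rw [PySem.List.pyRange_one_eq_nil (show n + 1 ≤ 4 by omega)]
    simp only [List.foldl_nil]
    apply list_eq_of_getD _ _ (by rw [hlen4]; simp)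
    intro k hk
    rw [hlen4] at hk
    rw [hget4 k hk, getD_repl, if_pos hk, if_neg (by omega)]
  · have hMI4 : 4 + ((((n+1).toNat - 4 : Nat)) : Int) = n + 1 := by omega
    obtain ⟨hlenR, hgetR⟩ := rLoop_inv (n+1).toNat _ hfib ((n+1).toNat - 4) (by omega)
    rw [hMI4] at hlenR hgetR
    apply list_eq_of_getD _ _ (by rw [hlen4, hlenR])
    intro k hk
    rw [hlen4] at hk
    rw [hget4 k hk, hgetR k hk]
    by_cases h : 4 ≤ k
    · rw [if_pos ⟨h, by omega⟩, if_pos ⟨h, by omega⟩]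
    · rw [if_neg (by omega), if_neg (by omega)]
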